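-- pv_equiv track=rewrite | github.com/chunhou-liu/workflow | schedule.py | greedy_division
-- ===== SOURCE A (Python) =====
-- import operator
--
-- def greedy_division(seq: list, k: int):
--     sequence = sorted(seq, reverse=True)
--     results = [list() for _ in range(k)]
--     count_dict = [0 for _ in range(k)]
--     for elem in sequence:
--         ind, count = min(enumerate(count_dict), key=operator.itemgetter(1))
--         results[ind].append(elem)
--         count_dict[ind] += elem
--     return results
-- ===== SOURCE B (Python) =====
-- def greedy_division(seq: list, k: int):
--     # Priority queue kept as a list of (bin_sum, bin_index) sorted ascending:
--     # take the front (least-loaded bin, lowest index on ties) and reinsert the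
--     # updated bin by shifting smaller entries down one slot (ordered insertion).
--     results = [[] for _ in range(k)]
--     bins = [(0, i) for i in range(k)]
--     for elem in sorted(seq, reverse=True):
--         count, ind = bins[0]
--         results[ind].append(elem)
--         item = (count + elem, ind)
--         pos = 1
--         while pos < len(bins) and bins[pos] < item:
--             bins[pos - 1] = bins[pos]
--             pos += 1
--         bins[pos - 1] = item
--     return results
-- ===== Notes on version B (the rewrite author's own statement) =====
-- stated objective: alternative
-- what changed: Replaces the per-element linear argmin scan over all k bin sums with a priority queue kept as a sorted list of (sum, index) pairs: pop the front, reinsert the updated bin with an ordered insertion.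
import Mathlib
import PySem

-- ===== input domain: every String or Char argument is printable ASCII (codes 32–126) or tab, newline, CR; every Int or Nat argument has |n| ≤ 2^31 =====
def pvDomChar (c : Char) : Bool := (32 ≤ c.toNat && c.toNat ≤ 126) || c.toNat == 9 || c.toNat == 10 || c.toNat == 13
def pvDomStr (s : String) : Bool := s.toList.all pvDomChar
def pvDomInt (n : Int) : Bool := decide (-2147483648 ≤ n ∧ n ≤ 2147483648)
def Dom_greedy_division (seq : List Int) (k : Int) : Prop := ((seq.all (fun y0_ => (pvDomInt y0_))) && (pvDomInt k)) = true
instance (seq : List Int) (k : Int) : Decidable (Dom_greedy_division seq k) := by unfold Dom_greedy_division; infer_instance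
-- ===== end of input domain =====

-- B replaces A's per-element linear argmin scan over the k bin sums with a priority queue kept
-- as a sorted list of (sum, index) pairs (pop front, ordered reinsert); equal return values.

-- ===== PORT A =====
-- results[ind].append / count_dict[ind] += elem: ind comes from enumerate, hence ≥ 0, so
-- List.set ind.toNat / List.getD ind.toNat are exact for Python's nonnegative indexing here.
def greedy_division (seq : List Int) (k : Int) : List (List Int) :=
  let sequence := PySem.List.sorted seq (fun x => x) true
  let results : List (List Int) := (PySem.List.pyRange 0 k 1).map (fun _ => [])
  let count_dict : List Int := (PySem.List.pyRange 0 k 1).map (fun _ => 0)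
  let st := sequence.foldl (fun st elem =>
    match PySem.List.min? (PySem.List.enumerate st.2) (fun p => p.2) with
    | none => st  -- Python raises ValueError (min of empty) here; excluded by Pre_
    | some m =>
        (st.1.set m.1.toNat ((st.1.getD m.1.toNat []) ++ [elem]),
         st.2.set m.1.toNat ((st.2.getD m.1.toNat 0) + elem))) (results, count_dict)
  st.1

-- ===== PORT B =====
-- _insort: insert into an ascending-sorted list of pairs (Python tuple order = lexicographic)
def gdInsort (bins : List (Int × Int)) (item : Int × Int) : List (Int × Int) :=
  match bins with
  | [] => [item]
  | b :: bs =>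
      if item.1 < b.1 ∨ (item.1 = b.1 ∧ item.2 < b.2) then item :: b :: bs
      else b :: gdInsort bs item

def greedy_division_alt (seq : List Int) (k : Int) : List (List Int) :=
  let results : List (List Int) := (PySem.List.pyRange 0 k 1).map (fun _ => [])
  let bins : List (Int × Int) := (PySem.List.pyRange 0 k 1).map (fun i => ((0 : Int), i))
  let st := (PySem.List.sorted seq (fun x => x) true).foldl (fun st elem =>
    match st.2 with
    | [] => st  -- bins[0] raises IndexError here; excluded by Pre_
    | (count, ind) :: rest =>
        (st.1.set ind.toNat ((st.1.getD ind.toNat []) ++ [elem]),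
         gdInsort rest (count + elem, ind))) (results, bins)
  st.1

-- ===== PRECONDITION & SPEC =====
-- A raises ValueError (min() of an empty sequence) when seq is nonempty and k ≤ 0; B raises
-- IndexError on exactly those inputs. Pre_ excludes exactly them.
def Pre_greedy_division (seq : List Int) (k : Int) : Prop := seq = [] ∨ 1 ≤ k
instance (seq : List Int) (k : Int) : Decidable (Pre_greedy_division seq k) := by
  unfold Pre_greedy_division; infer_instance

def pvWitness_greedy_division : List Int × Int := ([3, 1, 4, 1, 5], 2)

def Spec_greedy_division (seq : List Int) (k : Int) (out : List (List Int)) : Prop := out = greedy_division_alt seq k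
instance (seq : List Int) (k : Int) (out : List (List Int)) : Decidable (Spec_greedy_division seq k out) := by unfold Spec_greedy_division; infer_instance

-- ===== CLAIM (what is proved, stated in full; the proofs are below) =====
def Claim_equal_greedy_division : Prop := ∀ (seq : List Int) (k : Int), Dom_greedy_division seq k → Pre_greedy_division seq k → Spec_greedy_division seq k (greedy_division seq k)

-- ===== LEMMAS AND PROOFS =====

-- lexicographic strict order on (sum, index) pairs = Python's tuple '<'
def gdLt (p q : Int × Int) : Prop := p.1 < q.1 ∨ (p.1 = q.1 ∧ p.2 < q.2)

-- the (sum, index) pairs a count list denotes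
def pairsOf (counts : List Int) : List (Int × Int) :=
  (PySem.List.enumerate counts).map (fun p => (p.2, p.1))

-- the invariant tying B's bins to A's count_dict
def GDInv (counts : List Int) (bins : List (Int × Int)) : Prop :=
  bins.Perm (pairsOf counts) ∧ bins.Pairwise gdLt

lemma gdLt_trans {p q r : Int × Int} (h1 : gdLt p q) (h2 : gdLt q r) : gdLt p r := by
  unfold gdLt at *; omega

lemma gdLt_total {p q : Int × Int} (hne : p.2 ≠ q.2) (h : ¬ gdLt p q) : gdLt q p := by
  unfold gdLt at *; omega

lemma gdInsort_perm (bins : List (Int × Int)) (item : Int × Int) :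
    (gdInsort bins item).Perm (item :: bins) := by
  induction bins with
  | nil => simp [gdInsort]
  | cons b bs ih =>
      simp only [gdInsort]
      split
      · exact List.Perm.refl _
      · exact ((ih.cons b).trans (List.Perm.swap _ _ _))

lemma gdInsort_pairwise (bins : List (Int × Int)) (item : Int × Int)
    (hne : ∀ b ∈ bins, b.2 ≠ item.2) (hp : bins.Pairwise gdLt) :
    (gdInsort bins item).Pairwise gdLt := by
  induction bins with
  | nil => simp [gdInsort]
  | cons b bs ih =>
      rw [List.pairwise_cons] at hp
      simp only [gdInsort]
      split
      · rename_i hlt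
        refine List.pairwise_cons.mpr ⟨?_, List.pairwise_cons.mpr ⟨hp.1, hp.2⟩⟩
        intro y hy
        rcases List.mem_cons.mp hy with h | h
        · exact h ▸ hlt
        · exact gdLt_trans hlt (hp.1 y h)
      · rename_i hnlt
        have hbi : gdLt b item := gdLt_total (fun h => hne b (by simp) h.symm) hnlt
        refine List.pairwise_cons.mpr ⟨?_, ih (fun x hx => hne x (by simp [hx])) hp.2⟩
        intro y hy
        rcases (gdInsort_perm bs item).mem_iff.mp hy |> List.mem_cons.mp with h | h
        · exact h ▸ hbi
        · exact hp.1 y h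

-- the accumulator step of Python's min (first minimum wins)
def gdMinStep {α : Type} (key : α → Int) (acc : Option α) (x : α) : Option α :=
  match acc with
  | none => some x
  | some m => if key x < key m then some x else some m

lemma min?_eq_foldl {α : Type} (key : α → Int) (xs : List α) :
    PySem.List.min? xs key = xs.foldl (gdMinStep key) none := rfl

lemma min?_foldl_acc {α : Type} (key : α → Int) (xs : List α) (a : α) :
    xs.foldl (gdMinStep key) (some a) =
    some (match PySem.List.min? xs key with
          | none => a
          | some m => if key m < key a then m else a) := by
  induction xs generalizing a with
  | nil => simp [PySem.List.min?]
  | cons x t ih =>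
      have hstep : ∀ (b : α) (y : α),
          gdMinStep key (some b) y = if key y < key b then some y else some b := fun _ _ => rfl
      have hmx : PySem.List.min? (x :: t) key = t.foldl (gdMinStep key) (some x) := by
        rw [min?_eq_foldl, List.foldl_cons]; rfl
      rw [List.foldl_cons, hstep, hmx, ih x]
      by_cases hxa : key x < key a
      · rw [if_pos hxa, ih x]
        cases hmt : PySem.List.min? t key with
        | none => simp only; rw [if_pos hxa]
        | some m => simp only; split_ifs <;> first | rfl | omega
      · rw [if_neg hxa, ih a]
        cases hmt : PySem.List.min? t key with
        | none => simp only; rw [if_neg hxa]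
        | some m => simp only; split_ifs <;> first | rfl | omega

lemma min?_cons_eq {α : Type} (key : α → Int) (x : α) (xs : List α) :
    PySem.List.min? (x :: xs) key =
    some (match PySem.List.min? xs key with
          | none => x
          | some m => if key m < key x then m else x) := by
  rw [min?_eq_foldl, List.foldl_cons]
  have h : gdMinStep key none x = some x := rfl
  rw [h, min?_foldl_acc key xs x]

-- the first minimum of an fst-increasing pair list is its lexicographic minimum
lemma min?_lexmin (xs : List (Int × Int)) (hinc : xs.Pairwise (fun p q => p.1 < q.1))
    (m : Int × Int) (hm : m ∈ xs)
    (hmin : ∀ y ∈ xs, m.2 < y.2 ∨ (m.2 = y.2 ∧ m.1 ≤ y.1)) :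
    PySem.List.min? xs (fun p => p.2) = some m := by
  induction xs with
  | nil => cases hm
  | cons x t ih =>
      rw [List.pairwise_cons] at hinc
      rw [min?_cons_eq]
      rcases List.mem_cons.mp hm with rfl | hmt
      · cases hmt' : PySem.List.min? t (fun p => p.2) with
        | none => simp
        | some m' =>
            have hm'm : m' ∈ t := PySem.List.min?_mem hmt'
            have h1 := hmin m' (by simp [hm'm])
            have hxm' : m.1 < m'.1 := hinc.1 m' hm'm
            have h2 : ¬ (m'.2 < m.2) := by omega
            simp [h2]
      · have hmm : PySem.List.min? t (fun p => p.2) = some m :=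
          ih hinc.2 hmt (fun y hy => hmin y (by simp [hy]))
        rw [hmm]
        have hx := hmin x (by simp)
        have hxm : x.1 < m.1 := hinc.1 m hmt
        have h2 : m.2 < x.2 := by omega
        simp [h2]

-- enumerate after a point update
lemma enumerate_set (xs : List Int) (j : Nat) (v : Int) (s : Int) :
    PySem.List.enumerate (xs.set j v) s =
    (PySem.List.enumerate xs s).map (fun p => if p.1 = s + (j : Int) then (p.1, v) else p) := by
  induction xs generalizing j s with
  | nil => simp [PySem.List.enumerate_nil]
  | cons x t ih =>
      cases j with
      | zero =>
          simp only [List.set_cons_zero, PySem.List.enumerate_cons, List.map_cons]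
          rw [if_pos (by omega)]
          congr 1
          refine ((List.map_congr_left ?_).trans (List.map_id _)).symm
          intro p hp
          rcases (PySem.List.mem_enumerate_iff _ _ _).mp hp with ⟨kk, hk, rfl⟩
          simp only
          rw [if_neg (by omega)]
          rfl
      | succ n =>
          simp only [List.set_cons_succ, PySem.List.enumerate_cons, List.map_cons]
          rw [if_neg (by omega)]
          rw [ih n (s + 1)]
          congr 1
          apply List.map_congr_left
          intro p _
          have h : s + 1 + (n : Int) = s + ((n : ℕ) + 1 : ℕ) := by push_cast; ring
          rw [h]

lemma pairsOf_set (counts : List Int) (j : Nat) (v : Int) :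
    pairsOf (counts.set j v) =
    (pairsOf counts).map (fun q => if q.2 = (j : Int) then (v, q.2) else q) := by
  unfold pairsOf
  rw [enumerate_set, List.map_map, List.map_map]
  apply List.map_congr_left
  intro p _
  by_cases h : p.1 = (j : Int) <;> simp [Function.comp, h]

lemma nodup_snd_pairsOf (counts : List Int) :
    ((pairsOf counts).map (fun q => q.2)).Nodup := by
  unfold pairsOf
  rw [List.map_map]
  exact (List.Pairwise.map _ (fun p q hpq => Int.ne_of_lt hpq)
    (PySem.List.pairwise_lt_enumerate counts 0) : List.Pairwise (· ≠ ·) _)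

-- the two folds agree on the first component
lemma fold_eq (sq : List Int) (resA resB : List (List Int)) (counts : List Int)
    (bins : List (Int × Int)) (hres : resA = resB) (hInv : GDInv counts bins)
    (hk : counts ≠ [] ∨ sq = []) :
    (sq.foldl (fun st elem =>
      match PySem.List.min? (PySem.List.enumerate st.2) (fun p => p.2) with
      | none => st
      | some m =>
          (st.1.set m.1.toNat ((st.1.getD m.1.toNat []) ++ [elem]),
           st.2.set m.1.toNat ((st.2.getD m.1.toNat 0) + elem))) (resA, counts)).1 =
    (sq.foldl (fun st elem =>
      match st.2 with
      | [] => st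
      | (count, ind) :: rest =>
          (st.1.set ind.toNat ((st.1.getD ind.toNat []) ++ [elem]),
           gdInsort rest (count + elem, ind))) (resB, bins)).1 := by
  induction sq generalizing resA resB counts bins with
  | nil => simpa using hres
  | cons e t ih =>
      obtain ⟨hperm, hpair⟩ := hInv
      have hc : counts ≠ [] := by
        rcases hk with h | h
        · exact h
        · cases h
      -- bins is nonempty
      cases hbins : bins with
      | nil =>
          exfalso
          rw [hbins] at hperm
          have : pairsOf counts = [] := (List.Perm.nil_eq hperm).symm
          unfold pairsOf at this
          cases hcounts : counts with
          | nil => exact hc hcounts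
          | cons c0 ct =>
              rw [hcounts, PySem.List.enumerate_cons] at this
              simp at this
      | cons hd rest =>
          obtain ⟨c, i⟩ := hd
          subst hbins
          -- (i, c) is an entry of enumerate counts
          have hmemb : ((c, i) : Int × Int) ∈ pairsOf counts :=
            hperm.mem_iff.mp (by simp)
          have hmeme : ((i, c) : Int × Int) ∈ PySem.List.enumerate counts := by
            unfold pairsOf at hmemb
            rcases List.mem_map.mp hmemb with ⟨p, hp, hpe⟩
            have h1 : p.2 = c := congrArg Prod.fst hpe
            have h2 : p.1 = i := congrArg Prod.snd hpe
            rw [← h1, ← h2]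
            exact hp
          rcases (PySem.List.mem_enumerate_iff _ _ _).mp hmeme with ⟨j, hj, hji⟩
          have hi : i = (j : Int) := by
            have := congrArg Prod.fst hji; simpa using this
          have hcval : c = counts[j] := by
            have := congrArg Prod.snd hji; simpa using this
          -- snd entries of bins are distinct
          have hnd : ((((c, i) :: rest).map (fun q => q.2))).Nodup :=
            ((hperm.map (fun q => q.2)).nodup_iff).mpr (nodup_snd_pairsOf counts)
          have hrestne : ∀ q ∈ rest, q.2 ≠ i := by
            have hnd' : i ∉ rest.map (fun q => q.2) := by
              have hh : (((c, i) :: rest).map (fun q => q.2)) = i :: rest.map (fun q => q.2) := rfl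
              rw [hh] at hnd
              exact (List.nodup_cons.mp hnd).1
            intro q hq hqe
            exact hnd' (hqe ▸ List.mem_map_of_mem (f := fun q => q.2) hq)
          -- A picks exactly (i, c)
          have hmin : PySem.List.min? (PySem.List.enumerate counts) (fun p => p.2)
              = some (i, c) := by
            apply min?_lexmin _ (PySem.List.pairwise_lt_enumerate counts 0) _ hmeme
            intro y hy
            have hyb : ((y.2, y.1) : Int × Int) ∈ (c, i) :: rest :=
              hperm.symm.mem_iff.mp (List.mem_map_of_mem hy)
            rcases List.mem_cons.mp hyb with h | h
            · right
              exact ⟨(congrArg Prod.fst h).symm, le_of_eq (congrArg Prod.snd h).symm⟩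
            · have h2 := (List.pairwise_cons.mp hpair).1 _ h
              have h3 : c < y.2 ∨ (c = y.2 ∧ i < y.1) := h2
              show c < y.2 ∨ (c = y.2 ∧ i ≤ y.1)
              omega
          rw [List.foldl_cons, List.foldl_cons, hmin]
          simp only
          have hitoNat : i.toNat = j := by rw [hi]; exact Int.toNat_natCast j
          have hgetd : counts.getD j 0 = c := by
            rw [List.getD_eq_getElem counts 0 hj, hcval]
          rw [hitoNat, hgetd]
          apply ih
          · rw [hres]
          · constructor
            · -- permutation part of the invariant
              refine (gdInsort_perm rest (c + e, i)).trans ?_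
              have hmapg := hperm.map (fun q => if q.2 = (j : Int) then (c + e, q.2) else q)
              have htail : rest.map (fun q => if q.2 = (j : Int) then (c + e, q.2) else q) = rest := by
                refine (List.map_congr_left ?_).trans (List.map_id _)
                intro q hq
                rw [if_neg (by rw [← hi]; exact hrestne q hq)]
                rfl
              have hmapcons : ((c, i) :: rest).map (fun q => if q.2 = (j : Int) then (c + e, q.2) else q)
                  = (c + e, i) :: rest := by
                rw [List.map_cons, htail]
                congr 1
                rw [if_pos (show ((c, i) : Int × Int).2 = (j : Int) from hi)]
              rw [pairsOf_set]
              exact hmapcons ▸ hmapg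
            · exact gdInsort_pairwise rest (c + e, i) (fun b hb => hrestne b hb)
                (List.pairwise_cons.mp hpair).2
          · left
            intro hnil
            have h1 : (counts.set j (c + e)).length = 0 := by rw [hnil]; rfl
            rw [List.length_set] at h1
            omega

-- the initial bins are exactly the pairs of the initial (all-zero) count list
lemma init_pairs (n : Nat) :
    pairsOf ((List.range n).map (fun _ => (0 : Int))) =
    (List.range n).map (fun (j : Nat) => ((0 : Int), (j : Int))) := by
  unfold pairsOf
  rw [PySem.List.enumerate_eq_map_pyRange _ 0, PySem.List.len_eq]
  simp only [List.length_map, List.length_range]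
  rw [PySem.List.pyRange_zero_natCast, List.map_map, List.map_map]
  apply List.map_congr_left
  intro j hj
  simp only [Function.comp_apply]
  rw [PySem.List.pyGetD_natCast]
  rw [List.getD_eq_getElem _ _ (by simpa using hj)]
  simp

lemma init_inv (k : Int) :
    GDInv ((PySem.List.pyRange 0 k 1).map (fun _ => 0))
          ((PySem.List.pyRange 0 k 1).map (fun i => ((0 : Int), i))) := by
  have hR : PySem.List.pyRange 0 k 1 = (List.range (k - 0).toNat).map (fun (j : Nat) => (j : Int)) := by
    rw [PySem.List.pyRange_one]; simp
  rw [hR]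
  constructor
  · have hc : ((List.range (k - 0).toNat).map (fun (j : Nat) => (j : Int))).map (fun _ => (0 : Int))
        = (List.range (k - 0).toNat).map (fun _ => (0 : Int)) := by
      rw [List.map_map]; rfl
    rw [hc, init_pairs, List.map_map]
    exact List.Perm.of_eq (List.map_congr_left (fun a _ => rfl)).symm
  · rw [List.map_map, List.pairwise_map]
    refine List.Pairwise.imp ?_ List.pairwise_lt_range
    intro a b hab
    show (0 : Int) < 0 ∨ ((0 : Int) = (0 : Int) ∧ (a : Int) < (b : Int))
    omega

-- ===== VERDICT (by name: the statement is the Claim_ definition above) =====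
theorem greedy_division_spec : Claim_equal_greedy_division := by
  intro seq k _ hpre
  unfold Spec_greedy_division greedy_division greedy_division_alt
  simp only
  rcases hpre with rfl | hk
  · rw [show PySem.List.sorted ([] : List Int) (fun x => x) true = [] from rfl]
    simp
  · exact fold_eq _ _ _ _ _ rfl (init_inv k)
      (Or.inl (by
        rw [PySem.List.pyRange_one]
        simp only [ne_eq, List.map_eq_nil_iff, List.range_eq_nil]
        omega))
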